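-- pv_equiv track=rewrite | github.com/Pazitiff9/SubstringGraph-YandexTraineeDayTask | task.py | adding_graph
-- ===== SOURCE A (Python) =====
-- def adding_graph(graph, data):
--     """Заполнение графа"""
--     first = data[0]  # Wi
--     for second in data[1:]:  # Wi+1
--         if first in graph:
--             if second in graph[first]:
--                 graph[first][second] += 1
--             else:
--                 graph[first][second] = 1
--         else:
--             graph[first] = {second: 1}
--         first = second
--     return graph
-- ===== SOURCE B (Python) =====
-- def adding_graph(graph, data):
--     """Заполнение графа"""
--     # Pre_ excludes empty data, on which A raises IndexError (B returns graph unchanged).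
--     pairs = {}
--     for p in zip(data, data[1:]):
--         pairs[p] = pairs.get(p, 0) + 1
--     for (a, b), c in pairs.items():
--         inner = graph.setdefault(a, {})
--         inner[b] = inner.get(b, 0) + c
--     return graph
-- ===== Notes on version B (the rewrite author's own statement) =====
-- stated objective: alternative
-- what changed: A makes one incremental pass bumping each consecutive pair by 1 while carrying the previous word; B first aggregates all consecutive pairs into a counting dict and then merges each distinct edge with its total weight into the graph in a second pass.
import Mathlib
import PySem

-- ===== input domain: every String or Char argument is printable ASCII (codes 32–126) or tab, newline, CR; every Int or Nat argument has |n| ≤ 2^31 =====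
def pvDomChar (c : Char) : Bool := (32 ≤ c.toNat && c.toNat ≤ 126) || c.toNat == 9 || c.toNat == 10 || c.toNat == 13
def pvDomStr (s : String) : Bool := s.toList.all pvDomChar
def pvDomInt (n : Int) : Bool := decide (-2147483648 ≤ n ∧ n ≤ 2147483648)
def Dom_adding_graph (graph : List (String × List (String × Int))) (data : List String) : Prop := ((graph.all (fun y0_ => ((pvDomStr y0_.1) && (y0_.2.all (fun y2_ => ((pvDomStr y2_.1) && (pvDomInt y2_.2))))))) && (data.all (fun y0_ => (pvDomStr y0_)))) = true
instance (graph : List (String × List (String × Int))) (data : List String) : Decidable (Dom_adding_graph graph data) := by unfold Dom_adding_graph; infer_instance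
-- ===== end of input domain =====

-- B aggregates consecutive pairs into a counting dict first, then merges each distinct edge once (alternative decomposition).
-- Equivalence is about the RETURN value; the Python versions mutate `graph` in place (both the same way).


-- marshalling between the assoc-list convention and PySem.Dict (shared boundary code, not algorithm)
def pvToG (graph : List (String × List (String × Int))) : PySem.Dict String (PySem.Dict String Int) :=
  PySem.Dict.ofList (graph.map (fun p => (p.1, PySem.Dict.ofList p.2)))

def pvOfG (g : PySem.Dict String (PySem.Dict String Int)) : List (String × List (String × Int)) :=
  g.items.map (fun p => (p.1, p.2.items))

-- ===== PORT A =====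
def stepA (st : String × PySem.Dict String (PySem.Dict String Int)) (second : String) :
    String × PySem.Dict String (PySem.Dict String Int) :=
  let first := st.1
  let g := st.2
  if g.contains first then
    -- graph[first]: exact here, the key is present (guarded by the contains test)
    let inner := g.getD first PySem.Dict.empty
    if inner.contains second then
      -- graph[first][second] += 1 : in-place update = insert (overwrite keeps position)
      (second, g.insert first (inner.insert second (inner.getD second 0 + 1)))
    else
      (second, g.insert first (inner.insert second 1))
  else
    (second, g.insert first (PySem.Dict.ofList [(second, 1)]))

def adding_graph (graph : List (String × List (String × Int))) (data : List String) :
    List (String × List (String × Int)) :=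
  match data with
  | [] => graph   -- data[0] raises IndexError in Python; excluded by Pre_adding_graph
  | first :: _ =>
    pvOfG ((PySem.List.slice data (some 1) none).foldl stepA (first, pvToG graph)).2

-- ===== PORT B =====
def stepB (g : PySem.Dict String (PySem.Dict String Int))
    (pc : (String × String) × Int) : PySem.Dict String (PySem.Dict String Int) :=
  let g' := g.setdefault pc.1.1 PySem.Dict.empty
  let inner := g'.getD pc.1.1 PySem.Dict.empty
  g'.insert pc.1.1 (inner.insert pc.1.2 (inner.getD pc.1.2 0 + pc.2))

def adding_graph_alt (graph : List (String × List (String × Int))) (data : List String) :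
    List (String × List (String × Int)) :=
  let pairs := (data.zip (PySem.List.slice data (some 1) none)).foldl
      (fun d p => d.insert p (d.getD p 0 + 1)) PySem.Dict.empty
  pvOfG (pairs.items.foldl stepB (pvToG graph))

-- ===== PRECONDITION & SPEC =====
-- Pre_ excludes exactly empty data, on which A raises IndexError at data[0] (B returns graph unchanged there).
def Pre_adding_graph (graph : List (String × List (String × Int))) (data : List String) : Prop :=
  data ≠ []
instance (graph : List (String × List (String × Int))) (data : List String) : Decidable (Pre_adding_graph graph data) := by unfold Pre_adding_graph; infer_instance

def pvWitness_adding_graph : (List (String × List (String × Int))) × List String :=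
  ([("a", [("b", 1)])], ["a", "b", "a"])

def Spec_adding_graph (graph : List (String × List (String × Int))) (data : List String) (out : List (String × List (String × Int))) : Prop := out = adding_graph_alt graph data
instance (graph : List (String × List (String × Int))) (data : List String) (out : List (String × List (String × Int))) : Decidable (Spec_adding_graph graph data out) := by unfold Spec_adding_graph; infer_instance

-- ===== CLAIM (what is proved, stated in full; the proofs are below) =====
def Claim_equal_adding_graph : Prop := ∀ (graph : List (String × List (String × Int))) (data : List String), Dom_adding_graph graph data → Pre_adding_graph graph data → Spec_adding_graph graph data (adding_graph graph data)

-- ===== LEMMAS AND PROOFS =====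

-- the common "add c to edge (a, b)" operation both loop bodies reduce to
def bump (g : PySem.Dict String (PySem.Dict String Int)) (a b : String) (c : Int) :
    PySem.Dict String (PySem.Dict String Int) :=
  g.insert a ((g.getD a PySem.Dict.empty).insert b ((g.getD a PySem.Dict.empty).getD b 0 + c))

def bumpStep (g : PySem.Dict String (PySem.Dict String Int))
    (pc : (String × String) × Int) : PySem.Dict String (PySem.Dict String Int) :=
  bump g pc.1.1 pc.1.2 pc.2

theorem insert_comm_of_contains {κ ν : Type} [BEq κ] [LawfulBEq κ]
    (d : PySem.Dict κ ν) (k k' : κ) (v w : ν)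
    (hk : d.contains k = true) (hne : k ≠ k') :
    (d.insert k v).insert k' w = (d.insert k' w).insert k v := by
  apply PySem.Dict.ext
  by_cases hk' : d.contains k' = true
  · rw [PySem.Dict.items_insert_of_contains _ _ (by simp [PySem.Dict.contains_insert, hk']),
        PySem.Dict.items_insert_of_contains _ _ hk,
        PySem.Dict.items_insert_of_contains _ _ (by simp [PySem.Dict.contains_insert, hk]),
        PySem.Dict.items_insert_of_contains _ _ hk']
    simp only [List.map_map]
    apply List.map_congr_left
    intro p _
    by_cases h1 : p.1 = k <;> by_cases h2 : p.1 = k' <;> simp_all [Function.comp]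
  · have hk'' : d.contains k' = false := by simpa using hk'
    rw [PySem.Dict.items_insert_of_not_contains _ _
          (by simp [PySem.Dict.contains_insert, hk'', beq_false_of_ne (Ne.symm hne)]),
        PySem.Dict.items_insert_of_contains _ _ hk,
        PySem.Dict.items_insert_of_contains _ _ (by simp [PySem.Dict.contains_insert, hk]),
        PySem.Dict.items_insert_of_not_contains _ _ hk'']
    simp [beq_false_of_ne (Ne.symm hne)]

theorem bump_succ (g : PySem.Dict String (PySem.Dict String Int)) (a b : String) (c : Int) :
    bump (bump g a b c) a b 1 = bump g a b (c + 1) := by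
  simp [bump, PySem.Dict.getD_insert_self, PySem.Dict.insert_insert_self, add_assoc]

theorem bump_pres (g : PySem.Dict String (PySem.Dict String Int)) (a b a' b' : String) (c : Int)
    (h1 : g.contains a = true) (h2 : (g.getD a PySem.Dict.empty).contains b = true) :
    (bump g a' b' c).contains a = true ∧
      ((bump g a' b' c).getD a PySem.Dict.empty).contains b = true := by
  refine ⟨by simp [bump, PySem.Dict.contains_insert, h1], ?_⟩
  by_cases ha : a = a'
  · subst ha
    simp [bump, PySem.Dict.getD_insert_self, PySem.Dict.contains_insert, h2]
  · simp [bump, PySem.Dict.getD_insert_of_ne _ _ _ ha, h2]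

theorem bump_comm (g : PySem.Dict String (PySem.Dict String Int)) (p q : String × String) (c : Int)
    (hne : p ≠ q)
    (h1 : g.contains p.1 = true) (h2 : (g.getD p.1 PySem.Dict.empty).contains p.2 = true) :
    bump (bump g q.1 q.2 c) p.1 p.2 1 = bump (bump g p.1 p.2 1) q.1 q.2 c := by
  by_cases haa : p.1 = q.1
  · have hbb : p.2 ≠ q.2 := by
      intro h; exact hne (Prod.ext haa h)
    rw [← haa]
    simp only [bump, PySem.Dict.getD_insert_self, PySem.Dict.insert_insert_self,
      PySem.Dict.getD_insert_of_ne _ _ _ hbb, PySem.Dict.getD_insert_of_ne _ _ _ (Ne.symm hbb)]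
    exact congrArg _ (insert_comm_of_contains _ p.2 q.2 _ _ h2 hbb).symm
  · simp only [bump, PySem.Dict.getD_insert_of_ne _ _ _ haa,
      PySem.Dict.getD_insert_of_ne _ _ _ (Ne.symm haa)]
    exact (insert_comm_of_contains g p.1 q.1 _ _ h1 haa).symm

theorem fold_comm (L : List ((String × String) × Int))
    (g : PySem.Dict String (PySem.Dict String Int)) (p : String × String)
    (hL : p ∉ L.map (·.1))
    (h1 : g.contains p.1 = true) (h2 : (g.getD p.1 PySem.Dict.empty).contains p.2 = true) :
    L.foldl bumpStep (bump g p.1 p.2 1) = bump (L.foldl bumpStep g) p.1 p.2 1 := by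
  induction L generalizing g with
  | nil => rfl
  | cons qc L ih =>
    simp only [List.map_cons, List.mem_cons, not_or] at hL
    obtain ⟨hq, hL⟩ := hL
    simp only [List.foldl_cons]
    have hstep : bumpStep (bump g p.1 p.2 1) qc = bump (bumpStep g qc) p.1 p.2 1 := by
      show bump (bump g p.1 p.2 1) qc.1.1 qc.1.2 qc.2 = bump (bump g qc.1.1 qc.1.2 qc.2) p.1 p.2 1
      have := bump_comm g p (qc.1.1, qc.1.2) qc.2 (by simpa using hq) h1 h2
      simpa using this.symm
    rw [hstep]
    exact ih (bumpStep g qc) hL (bump_pres g p.1 p.2 qc.1.1 qc.1.2 qc.2 h1 h2).1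
      (bump_pres g p.1 p.2 qc.1.1 qc.1.2 qc.2 h1 h2).2

theorem fold_inc (L : List ((String × String) × Int))
    (g : PySem.Dict String (PySem.Dict String Int)) (p : String × String)
    (hnd : (L.map (·.1)).Nodup) (hp : p ∈ L.map (·.1)) :
    (L.map (fun q => if q.1 = p then (q.1, q.2 + 1) else q)).foldl bumpStep g
      = bump (L.foldl bumpStep g) p.1 p.2 1 := by
  induction L generalizing g with
  | nil => simp at hp
  | cons qc L ih =>
    simp only [List.map_cons, List.nodup_cons] at hnd
    obtain ⟨hq, hnd⟩ := hnd
    by_cases hqp : qc.1 = p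
    · subst hqp
      have hrest : qc.1 ∉ L.map (·.1) := hq
      have hmap : L.map (fun q => if q.1 = qc.1 then (q.1, q.2 + 1) else q) = L := by
        conv_rhs => rw [← List.map_id L]
        apply List.map_congr_left
        intro x hx
        have hx1 : x.1 ≠ qc.1 := by
          intro h; exact hrest (h ▸ List.mem_map_of_mem hx)
        simp [hx1]
      simp only [List.map_cons, if_pos rfl, List.foldl_cons, hmap, if_true]
      have hsucc : bumpStep g (qc.1, qc.2 + 1) = bump (bumpStep g qc) qc.1.1 qc.1.2 1 :=
        (bump_succ g qc.1.1 qc.1.2 qc.2).symm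
      rw [hsucc]
      exact fold_comm L (bumpStep g qc) qc.1 hrest
        (by simp [bumpStep, bump, PySem.Dict.contains_insert])
        (by simp [bumpStep, bump, PySem.Dict.getD_insert_self, PySem.Dict.contains_insert])
    · simp only [List.map_cons, if_neg hqp, List.foldl_cons]
      have hp2 : p ∈ L.map (·.1) := by
        rcases List.mem_cons.mp hp with h | h
        · exact absurd h.symm hqp
        · exact h
      exact ih (bumpStep g qc) hnd hp2

theorem stepA_eq (f s : String) (g : PySem.Dict String (PySem.Dict String Int)) :
    stepA (f, g) s = (s, bump g f s 1) := by
  by_cases hc : g.contains f = true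
  · by_cases hcb : (g.getD f PySem.Dict.empty).contains s = true
    · simp [stepA, bump, hc, hcb]
    · have h0 : (g.getD f PySem.Dict.empty).getD s 0 = 0 :=
        PySem.Dict.getD_of_not_contains _ _ (by simpa using hcb)
      simp [stepA, bump, hc, hcb, h0]
  · have h0 : g.getD f PySem.Dict.empty = PySem.Dict.empty :=
      PySem.Dict.getD_of_not_contains _ _ (by simpa using hc)
    simp [stepA, bump, hc, h0]
    rfl

theorem stepB_eq (g : PySem.Dict String (PySem.Dict String Int)) (pc : (String × String) × Int) :
    stepB g pc = bumpStep g pc := by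
  by_cases hc : g.contains pc.1.1 = true
  · simp [stepB, bumpStep, bump, PySem.Dict.setdefault_of_contains _ _ hc]
  · have hc' : g.contains pc.1.1 = false := by simpa using hc
    have h0 : g.getD pc.1.1 PySem.Dict.empty = PySem.Dict.empty :=
      PySem.Dict.getD_of_not_contains _ _ hc'
    simp [stepB, bumpStep, bump, PySem.Dict.setdefault_of_not_contains _ _ hc',
      PySem.Dict.getD_insert_self, PySem.Dict.insert_insert_self, h0]

theorem core (ps : List (String × String)) (g0 : PySem.Dict String (PySem.Dict String Int)) :
    ps.foldl (fun g p => bump g p.1 p.2 1) g0 = (PySem.Dict.counter ps).items.foldl bumpStep g0 := by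
  induction ps using List.reverseRecOn with
  | nil => simp [PySem.Dict.items_counter]
  | append_singleton ps p ih =>
    rw [List.foldl_append, List.foldl_cons, List.foldl_nil, ih,
        PySem.Dict.items_counter, PySem.Dict.items_counter, PySem.Set.ofList_append_singleton]
    by_cases hp : p ∈ ps
    · rw [PySem.Set.add_of_mem ((PySem.Set.mem_ofList _ _).mpr hp)]
      have hmap : (PySem.Set.ofList ps).map (fun k => (k, (List.count k (ps ++ [p]) : Int)))
          = ((PySem.Set.ofList ps).map (fun k => (k, (List.count k ps : Int)))).map
              (fun q => if q.1 = p then (q.1, q.2 + 1) else q) := by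
        rw [List.map_map]
        apply List.map_congr_left
        intro k _
        by_cases hkp : k = p
        · subst hkp
          simp [List.count_append, Function.comp]
        · have hpk : ¬ p = k := fun h => hkp h.symm
          simp [List.count_append, Function.comp, hpk, hkp]
      rw [hmap]
      have hid : ((fun x => x.1) ∘ fun k : String × String => (k, (List.count k ps : Int))) = id := rfl
      have hnd : ((((PySem.Set.ofList ps).map (fun k => (k, (List.count k ps : Int))))).map (·.1)).Nodup := by
        rw [List.map_map, hid, List.map_id]
        exact PySem.Set.nodup_ofList ps
      have hmem : p ∈ ((((PySem.Set.ofList ps).map (fun k => (k, (List.count k ps : Int))))).map (·.1)) := by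
        rw [List.map_map, hid, List.map_id]
        exact (PySem.Set.mem_ofList _ _).mpr hp
      exact (fold_inc _ g0 p hnd hmem).symm
    · rw [PySem.Set.add_of_not_mem (fun h => hp ((PySem.Set.mem_ofList _ _).mp h)),
          List.map_append, List.foldl_append]
      have hmap : (PySem.Set.ofList ps).map (fun k => (k, (List.count k (ps ++ [p]) : Int)))
          = (PySem.Set.ofList ps).map (fun k => (k, (List.count k ps : Int))) := by
        apply List.map_congr_left
        intro k hk
        have hkp : k ≠ p := fun h => hp (h ▸ (PySem.Set.mem_ofList _ _).mp hk)
        have hpk : ¬ p = k := fun h => hkp h.symm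
        simp [List.count_append, hpk]
      have hcount : List.count p (ps ++ [p]) = 1 := by
        simp [List.count_append, List.count_eq_zero.mpr hp]
      rw [hmap]
      simp only [List.map_cons, List.map_nil]
      rw [hcount]
      rfl

theorem A_fold (rest : List String) (f : String) (g : PySem.Dict String (PySem.Dict String Int)) :
    (rest.foldl stepA (f, g)).2
      = ((f :: rest).zip rest).foldl (fun g p => bump g p.1 p.2 1) g := by
  induction rest generalizing f g with
  | nil => rfl
  | cons s rest ih =>
    rw [List.foldl_cons, stepA_eq, List.zip_cons_cons, List.foldl_cons]
    exact ih s (bump g f s 1)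

-- ===== VERDICT (by name: the statement is the Claim_ definition above) =====
theorem adding_graph_spec : Claim_equal_adding_graph := by
  intro graph data _ hpre
  unfold Spec_adding_graph
  match data with
  | [] => exact absurd rfl hpre
  | f :: rest =>
    have hslice : PySem.List.slice (f :: rest) (some 1) none = rest := by
      rw [PySem.List.slice_from_one]
      rfl
    have hstepB : stepB = bumpStep := funext fun g => funext fun pc => stepB_eq g pc
    have hA : adding_graph graph (f :: rest)
        = pvOfG ((PySem.List.slice (f :: rest) (some 1) none).foldl stepA (f, pvToG graph)).2 := rfl
    have hB : adding_graph_alt graph (f :: rest)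
        = pvOfG ((((f :: rest).zip (PySem.List.slice (f :: rest) (some 1) none)).foldl
            (fun d p => d.insert p (d.getD p 0 + 1)) PySem.Dict.empty).items.foldl stepB
              (pvToG graph)) := rfl
    rw [hA, hB, hslice, A_fold, PySem.Dict.foldl_insert_getD_add_one_eq_counter, hstepB, ← core]
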